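-- pv_equiv track=rewrite | github.com/HotShot003/Data-Structure-Practice-Questions | Arrays/ArrayProblems33.py | xorsubarr
-- ===== SOURCE A (Python) =====
-- def xorsubarr(arr,k):
--
--     n = len(arr)
--     c = 0
--
--     for i in range(n):
--         for j in range(i,n):
--             if (arr[i] ^ arr[j]) == k:
--                 c += 1
--     return c
-- ===== SOURCE B (Python) =====
-- def xorsubarr(arr, k):
--     # one pass with a frequency map: for each j, add the number of i <= j with arr[i] == arr[j] ^ k
--     c = 0
--     freq = {}
--     for x in arr:
--         freq[x] = freq.get(x, 0) + 1
--         c += freq.get(x ^ k, 0)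
--     return c
-- ===== Notes on version B (the rewrite author's own statement) =====
-- stated objective: faster
-- what changed: Replaced A's O(n^2) double loop over index pairs by a single pass that keeps a frequency dictionary of elements seen so far and, for each element x, adds the count of occurrences of x^k among the elements up to and including x.
import Mathlib
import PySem

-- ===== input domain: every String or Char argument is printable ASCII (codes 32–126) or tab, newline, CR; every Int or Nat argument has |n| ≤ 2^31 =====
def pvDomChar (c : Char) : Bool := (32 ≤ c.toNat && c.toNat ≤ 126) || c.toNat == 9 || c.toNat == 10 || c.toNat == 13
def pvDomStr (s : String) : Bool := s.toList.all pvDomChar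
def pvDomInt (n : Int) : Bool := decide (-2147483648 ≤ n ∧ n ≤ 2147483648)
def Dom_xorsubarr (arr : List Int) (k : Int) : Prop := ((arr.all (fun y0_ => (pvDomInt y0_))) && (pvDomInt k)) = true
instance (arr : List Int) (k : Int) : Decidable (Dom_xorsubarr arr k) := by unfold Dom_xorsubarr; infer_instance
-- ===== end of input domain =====

-- B replaces A's O(n^2) double loop by a single pass with a frequency dictionary (faster, asymptotic).


-- ===== PORT A =====
def xorsubarr (arr : List Int) (k : Int) : Int :=
  let n : Int := arr.length
  (PySem.List.pyRange 0 n 1).foldl (fun c i =>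
    (PySem.List.pyRange i n 1).foldl (fun c j =>
      if PySem.Int.bxor (PySem.List.pyGetD arr i 0) (PySem.List.pyGetD arr j 0) = k then c + 1 else c) c) 0

-- ===== PORT B =====
def xorsubarr_alt (arr : List Int) (k : Int) : Int :=
  (arr.foldl (fun (s : PySem.Dict Int Int × Int) x =>
      let freq := s.1.modify x 0 (· + 1)
      (freq, s.2 + freq.getD (PySem.Int.bxor x k) 0))
    (PySem.Dict.empty, 0)).2

-- ===== PRECONDITION & SPEC =====
def Spec_xorsubarr (arr : List Int) (k : Int) (out : Int) : Prop := out = xorsubarr_alt arr k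
instance (arr : List Int) (k : Int) (out : Int) : Decidable (Spec_xorsubarr arr k out) := by unfold Spec_xorsubarr; infer_instance

-- ===== CLAIM =====
def Claim_equal_xorsubarr : Prop := ∀ (arr : List Int) (k : Int), Dom_xorsubarr arr k → Spec_xorsubarr arr k (xorsubarr arr k)

-- ===== LEMMAS AND PROOFS =====
theorem pv_nat_xor_cancel (a b : Nat) : a ^^^ (a ^^^ b) = b := by
  rw [← Nat.xor_assoc, Nat.xor_self, Nat.zero_xor]

theorem pv_bxor_cancel (a b : Int) : PySem.Int.bxor a (PySem.Int.bxor a b) = b := by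
  simp only [PySem.Int.bxor]
  split_ifs <;> simp_all [pv_nat_xor_cancel] <;> omega

theorem pv_bxor_eq_iff (a y k : Int) : PySem.Int.bxor a y = k ↔ y = PySem.Int.bxor a k := by
  constructor
  · rintro rfl; rw [pv_bxor_cancel]
  · rintro rfl; rw [pv_bxor_cancel]

-- A's value in closed form: for each index m, the count of x^k among the suffix from m
def pvAcount (arr : List Int) (k : Int) : Int :=
  ((List.range arr.length).map
    (fun m => ((arr.drop m).count (PySem.Int.bxor (arr.getD m 0) k) : Int))).sum

theorem pvA_eq (arr : List Int) (k : Int) : xorsubarr arr k = pvAcount arr k := by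
  unfold xorsubarr pvAcount
  simp only
  rw [show ((fun (c : Int) i =>
        (PySem.List.pyRange i (arr.length : Int) 1).foldl (fun c j =>
          if PySem.Int.bxor (PySem.List.pyGetD arr i 0) (PySem.List.pyGetD arr j 0) = k then c + 1 else c) c))
      = (fun (c : Int) i => c + ((PySem.List.pyRange i (arr.length : Int) 1).countP
          (fun j => decide (PySem.Int.bxor (PySem.List.pyGetD arr i 0) (PySem.List.pyGetD arr j 0) = k)) : Int))
    from funext fun c => funext fun i => PySem.List.foldl_ite_add_one _ _ _]
  rw [PySem.List.foldl_add, zero_add]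
  rw [PySem.List.pyRange_zero_nat]
  rw [List.map_map]
  congr 1
  apply List.map_congr_left
  intro m hm
  rw [List.mem_range] at hm
  have h0 : (0:Int) ≤ (m:Int) := by positivity
  simp only [Function.comp]
  rw [show (PySem.List.pyRange (m:Int) (arr.length : Int) 1).countP
        (fun j => decide (PySem.Int.bxor (PySem.List.pyGetD arr (m:Int) 0) (PySem.List.pyGetD arr j 0) = k))
      = ((PySem.List.pyRange (m:Int) (arr.length : Int) 1).map (fun j => PySem.List.pyGetD arr j 0)).countP
        (fun y => decide (PySem.Int.bxor (PySem.List.pyGetD arr (m:Int) 0) y = k))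
    from (List.countP_map (p := fun y => decide (PySem.Int.bxor (PySem.List.pyGetD arr (m:Int) 0) y = k))
      (f := fun j => PySem.List.pyGetD arr j 0) (l := PySem.List.pyRange (m:Int) (arr.length:Int))).symm]
  rw [PySem.List.map_pyGetD_pyRange' arr 0 h0]
  simp only [PySem.List.pyGetD_natCast, Int.toNat_natCast]
  congr 1
  rw [List.count]
  apply List.countP_congr
  intro y _
  simp [pv_bxor_eq_iff]

-- the per-prefix pair count B accumulates
def pvG (k : Int) : List Int → List Int → Int
  | _, [] => 0
  | p, x :: t => (((p ++ [x]).count (PySem.Int.bxor x k) : Nat) : Int) + pvG k (p ++ [x]) t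

theorem pvB_inv (k : Int) (t p : List Int) (c : Int) :
    (t.foldl (fun (s : PySem.Dict Int Int × Int) x =>
        let freq := s.1.modify x 0 (· + 1)
        (freq, s.2 + freq.getD (PySem.Int.bxor x k) 0))
      (PySem.Dict.counter p, c)).2 = c + pvG k p t := by
  induction t generalizing p c with
  | nil => simp [pvG]
  | cons x t ih =>
    simp only [List.foldl_cons, pvG]
    rw [show (PySem.Dict.counter p).modify x 0 (· + 1) = PySem.Dict.counter (p ++ [x])
      from (PySem.Dict.counter_append_singleton p x).symm]
    rw [ih]
    rw [PySem.Dict.getD_counter]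
    ring

theorem pvB_eq (arr : List Int) (k : Int) : xorsubarr_alt arr k = pvG k [] arr := by
  unfold xorsubarr_alt
  have h : (PySem.Dict.empty : PySem.Dict Int Int) = PySem.Dict.counter [] := rfl
  rw [h, pvB_inv, zero_add]

theorem pvG_append (k x : Int) (t p : List Int) :
    pvG k p (t ++ [x]) = pvG k p t + ((p ++ t ++ [x]).count (PySem.Int.bxor x k) : Int) := by
  induction t generalizing p with
  | nil => simp [pvG]
  | cons y t ih =>
    simp only [List.cons_append, pvG, ih, List.append_assoc]
    ring_nf
    simp

theorem pv_map_getD_range (xs : List Int) :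
    List.map (fun m => xs.getD m 0) (List.range xs.length) = xs := by
  apply List.ext_getElem
  · simp
  · intro i h1 h2
    simp [List.getD_eq_getElem?_getD, List.getElem?_eq_getElem h2]

theorem pv_bxor_eq_iff' (a x k : Int) : (x = PySem.Int.bxor a k) ↔ (a = PySem.Int.bxor x k) := by
  rw [← pv_bxor_eq_iff, PySem.Int.bxor_comm, pv_bxor_eq_iff]

theorem pvAcount_append (xs : List Int) (x k : Int) :
    pvAcount (xs ++ [x]) k = pvAcount xs k + ((xs ++ [x]).count (PySem.Int.bxor x k) : Int) := by
  unfold pvAcount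
  rw [List.length_append, List.length_cons, List.length_nil, List.range_succ, List.map_append,
    List.sum_append]
  simp only [List.map_cons, List.map_nil, List.sum_cons, List.sum_nil, add_zero]
  rw [List.drop_append_of_le_length (le_refl _), List.drop_length, List.nil_append,
    List.getD_append_right _ _ _ _ (le_refl _), Nat.sub_self]
  have hmap : List.map
        (fun m => ((List.count (PySem.Int.bxor ((xs ++ [x]).getD m 0) k) (List.drop m (xs ++ [x]))) : Int))
        (List.range xs.length)
      = List.map
        (fun m => ((List.count (PySem.Int.bxor (xs.getD m 0) k) (List.drop m xs) : Int)
          + (if xs.getD m 0 = PySem.Int.bxor x k then (1:Int) else 0)))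
        (List.range xs.length) := by
    apply List.map_congr_left
    intro m hm
    rw [List.mem_range] at hm
    rw [List.getD_append _ _ _ _ hm, List.drop_append_of_le_length (Nat.le_of_lt hm),
      List.count_append, List.count_singleton]
    push_cast
    congr 1
    split_ifs with h1 h2 h2
    · rfl
    · exact absurd ((pv_bxor_eq_iff' _ _ _).mp (eq_of_beq h1)) h2
    · exact absurd (beq_iff_eq.mpr ((pv_bxor_eq_iff' _ _ _).mpr h2)) (by simp_all)
    · rfl
  rw [hmap, PySem.List.sum_map_add_int]
  rw [show (fun m => (if xs.getD m 0 = PySem.Int.bxor x k then (1:Int) else 0))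
        = ((fun y => (if y = PySem.Int.bxor x k then (1:Int) else 0)) ∘ (fun m => xs.getD m 0))
      from rfl]
  rw [← List.map_map, pv_map_getD_range]
  rw [show (fun y => (if y = PySem.Int.bxor x k then (1:Int) else 0))
        = (fun y => (if (fun z => z == PySem.Int.bxor x k) y = true then (1:Int) else 0))
      from funext fun y => by simp]
  rw [PySem.List.sum_map_ite_one_zero, ← List.count_eq_countP, List.count_append, List.count_singleton]
  push_cast
  rw [List.getD_cons_zero, List.count_singleton]
  split_ifs <;> push_cast <;> ring

theorem pv_main (arr : List Int) (k : Int) : pvAcount arr k = pvG k [] arr := by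
  induction arr using List.reverseRecOn with
  | nil => simp [pvAcount, pvG]
  | append_singleton xs x ih =>
    rw [pvAcount_append, pvG_append, ← ih]
    simp

-- ===== VERDICT =====
theorem xorsubarr_spec : Claim_equal_xorsubarr := by
  intro arr k _
  unfold Spec_xorsubarr
  rw [pvA_eq, pvB_eq, pv_main]
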